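-- pv_equiv track=rewrite | github.com/dharm0809/Provn | src/gateway/pipeline/orchestrator.py | _summarize_content_analysis
-- ===== SOURCE A (Python) =====
-- def _summarize_content_analysis(decisions: list) -> str:
--     """Summarize content analysis decisions into a single header value."""
--     if not decisions:
--         return "clean"
--     for d in decisions:
--         if d.get("action") == "block":
--             return "blocked"
--     verdicts = [d.get("verdict", "") for d in decisions]
--     if any("pii" in v for v in verdicts):
--         return "pii_warn"
--     if any("toxic" in v or "warn" in v for v in verdicts):
--         return "toxicity_warn"
--     return "clean"
-- ===== SOURCE B (Python) =====
-- def _summarize_content_analysis(decisions: list) -> str: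
--     """Summarize content analysis decisions into a single header value."""
--     def rank(d):
--         if d.get("action") == "block":
--             return 3
--         v = d.get("verdict", "")
--         if "pii" in v:
--             return 2
--         if "toxic" in v or "warn" in v:
--             return 1
--         return 0
--     worst = 0
--     for d in decisions:
--         worst = max(worst, rank(d))
--     return ("clean", "toxicity_warn", "pii_warn", "blocked")[worst]
-- ===== Notes on version B (the rewrite author's own statement) =====
-- stated objective: alternative
-- what changed: Replaced A's early-return priority cascade (a block-scan pass plus up to three any-scans over a verdicts list) with a single fold mapping each decision to a severity rank 0-3, keeping the maximum, and indexing the header table by the final rank.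
import Mathlib
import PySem

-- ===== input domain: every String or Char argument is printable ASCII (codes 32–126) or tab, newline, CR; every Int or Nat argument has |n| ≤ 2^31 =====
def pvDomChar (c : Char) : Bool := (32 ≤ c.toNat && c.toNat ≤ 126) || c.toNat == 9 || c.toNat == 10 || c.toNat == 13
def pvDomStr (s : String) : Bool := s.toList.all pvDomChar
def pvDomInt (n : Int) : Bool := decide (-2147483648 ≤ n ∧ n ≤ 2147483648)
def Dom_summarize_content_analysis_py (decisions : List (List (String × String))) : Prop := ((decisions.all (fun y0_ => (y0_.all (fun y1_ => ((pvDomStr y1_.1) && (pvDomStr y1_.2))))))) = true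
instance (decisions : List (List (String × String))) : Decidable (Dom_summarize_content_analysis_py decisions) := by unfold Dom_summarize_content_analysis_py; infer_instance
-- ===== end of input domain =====

-- ===== PORT A =====
-- B changes: one max-of-ranks fold plus a table lookup instead of A's early-return priority cascade (alternative decomposition, same cost).
-- dict lookup: assoc-list first-match, per the type convention
def pvLookup (d : List (String × String)) (k : String) : Option String :=
  d.lookup k

-- 'for d in decisions: if d.get("action") == "block": return "blocked"' — recursion with early return
def pvA_blockScan : List (List (String × String)) → Bool
  | [] => false
  | d :: rest => if pvLookup d "action" = some "block" then true else pvA_blockScan rest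

def summarize_content_analysis_py (decisions : List (List (String × String))) : String :=
  if decisions = [] then "clean"
  else if pvA_blockScan decisions then "blocked"
  else
    let verdicts := decisions.map (fun d => (pvLookup d "verdict").getD "")
    if verdicts.any (fun v => PySem.Str.isIn "pii" v) then "pii_warn"
    else if verdicts.any (fun v => PySem.Str.isIn "toxic" v || PySem.Str.isIn "warn" v) then "toxicity_warn"
    else "clean"

-- ===== PORT B =====
def pvRank (d : List (String × String)) : Nat :=
  if pvLookup d "action" = some "block" then 3
  else
    let v := (pvLookup d "verdict").getD ""
    if PySem.Str.isIn "pii" v then 2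
    else if PySem.Str.isIn "toxic" v || PySem.Str.isIn "warn" v then 1
    else 0

def summarize_content_analysis_py_alt (decisions : List (List (String × String))) : String :=
  match decisions.foldl (fun worst d => max worst (pvRank d)) 0 with
  | 3 => "blocked"
  | 2 => "pii_warn"
  | 1 => "toxicity_warn"
  | _ => "clean"

-- ===== PRECONDITION & SPEC =====
def Spec_summarize_content_analysis_py (decisions : List (List (String × String))) (out : String) : Prop := out = summarize_content_analysis_py_alt decisions
instance (decisions : List (List (String × String))) (out : String) : Decidable (Spec_summarize_content_analysis_py decisions out) := by unfold Spec_summarize_content_analysis_py; infer_instance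

-- ===== CLAIM (what is proved, stated in full; the proofs are below) =====
def Claim_equal_summarize_content_analysis_py : Prop := ∀ (decisions : List (List (String × String))), Dom_summarize_content_analysis_py decisions → Spec_summarize_content_analysis_py decisions (summarize_content_analysis_py decisions)

-- ===== LEMMAS AND PROOFS =====

theorem pvRank_le (d : List (String × String)) : pvRank d ≤ 3 := by
  simp only [pvRank]; split_ifs <;> simp

theorem le_foldl_rank_iff (l : List (List (String × String))) (a k : Nat) :
    k ≤ l.foldl (fun worst d => max worst (pvRank d)) a ↔ k ≤ a ∨ ∃ d ∈ l, k ≤ pvRank d := by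
  induction l generalizing a with
  | nil => simp
  | cons d rest ih =>
    simp only [List.foldl_cons, ih, le_max_iff, List.mem_cons]
    constructor
    · rintro ((h | h) | ⟨e, he, hk⟩)
      · exact Or.inl h
      · exact Or.inr ⟨d, Or.inl rfl, h⟩
      · exact Or.inr ⟨e, Or.inr he, hk⟩
    · rintro (h | ⟨e, (rfl | he), hk⟩)
      · exact Or.inl (Or.inl h)
      · exact Or.inl (Or.inr hk)
      · exact Or.inr ⟨e, he, hk⟩

theorem foldl_rank_le_iff (l : List (List (String × String))) (a k : Nat) :
    l.foldl (fun worst d => max worst (pvRank d)) a ≤ k ↔ a ≤ k ∧ ∀ d ∈ l, pvRank d ≤ k := by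
  induction l generalizing a with
  | nil => simp
  | cons d rest ih =>
    simp only [List.foldl_cons, ih, max_le_iff, List.mem_cons]
    constructor
    · rintro ⟨⟨ha, hd⟩, hrest⟩
      exact ⟨ha, fun e he => he.elim (fun h => h ▸ hd) (hrest e)⟩
    · rintro ⟨ha, h⟩
      exact ⟨⟨ha, h d (Or.inl rfl)⟩, fun e he => h e (Or.inr he)⟩

theorem pvA_blockScan_iff (l : List (List (String × String))) :
    pvA_blockScan l = true ↔ ∃ d ∈ l, pvLookup d "action" = some "block" := by
  induction l with
  | nil => simp [pvA_blockScan]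
  | cons d rest ih =>
    unfold pvA_blockScan
    by_cases h : pvLookup d "action" = some "block" <;> simp [h, ih]

theorem pvRank_eq_three_iff (d : List (String × String)) :
    3 ≤ pvRank d ↔ pvLookup d "action" = some "block" := by
  simp only [pvRank]; split_ifs with h1 h2 h3 <;> simp [h1]

theorem pvRank_ge_two_iff (d : List (String × String))
    (hnb : ¬ pvLookup d "action" = some "block") :
    2 ≤ pvRank d ↔ PySem.Str.isIn "pii" ((pvLookup d "verdict").getD "") = true := by
  simp only [pvRank]; split_ifs with h1 h2 h3 <;> simp_all

theorem pvRank_ge_one_iff (d : List (String × String))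
    (hnb : ¬ pvLookup d "action" = some "block")
    (hnp : ¬ PySem.Str.isIn "pii" ((pvLookup d "verdict").getD "") = true) :
    1 ≤ pvRank d ↔ (PySem.Str.isIn "toxic" ((pvLookup d "verdict").getD "") ||
                     PySem.Str.isIn "warn" ((pvLookup d "verdict").getD "")) = true := by
  simp only [pvRank]; split_ifs with h1 h2 h3 <;> simp_all

-- ===== VERDICT (by name: the statement is the Claim_ definition above) =====
theorem summarize_content_analysis_py_spec : Claim_equal_summarize_content_analysis_py := by
  intro decisions _
  unfold Spec_summarize_content_analysis_py summarize_content_analysis_py summarize_content_analysis_py_alt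
  set m := decisions.foldl (fun worst d => max worst (pvRank d)) 0 with hm
  have hm3 : m ≤ 3 := by
    rw [hm, foldl_rank_le_iff]
    exact ⟨by omega, fun d _ => pvRank_le d⟩
  by_cases hnil : decisions = []
  · subst hnil; simp [hm]
  · simp only [if_neg hnil]
    by_cases hb : pvA_blockScan decisions = true
    · -- some decision blocks: m = 3
      obtain ⟨d, hd, hblock⟩ := (pvA_blockScan_iff decisions).mp hb
      have h3 : 3 ≤ m := by
        rw [hm, le_foldl_rank_iff]
        exact Or.inr ⟨d, hd, (pvRank_eq_three_iff d).mpr hblock⟩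
      have : m = 3 := by omega
      rw [if_pos hb, this]
    · rw [if_neg hb]
      have hnoblock : ∀ d ∈ decisions, ¬ pvLookup d "action" = some "block" := by
        intro d hd hc
        exact hb ((pvA_blockScan_iff decisions).mpr ⟨d, hd, hc⟩)
      have hnot3 : ¬ 3 ≤ m := by
        rw [hm, le_foldl_rank_iff]
        rintro (h | ⟨d, hd, h⟩)
        · omega
        · exact hnoblock d hd ((pvRank_eq_three_iff d).mp h)
      simp only [List.any_map, List.any_eq_true, Function.comp]
      by_cases hp : ∃ d ∈ decisions, PySem.Str.isIn "pii" ((pvLookup d "verdict").getD "") = true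
      · obtain ⟨d, hd, hpii⟩ := hp
        have h2 : 2 ≤ m := by
          rw [hm, le_foldl_rank_iff]
          exact Or.inr ⟨d, hd, (pvRank_ge_two_iff d (hnoblock d hd)).mpr hpii⟩
        have : m = 2 := by omega
        rw [if_pos ⟨d, hd, hpii⟩, this]
      · rw [if_neg hp]
        push_neg at hp
        have hnot2 : ¬ 2 ≤ m := by
          rw [hm, le_foldl_rank_iff]
          rintro (h | ⟨d, hd, h⟩)
          · omega
          · exact (hp d hd) ((pvRank_ge_two_iff d (hnoblock d hd)).mp h)
        by_cases ht : ∃ d ∈ decisions, (PySem.Str.isIn "toxic" ((pvLookup d "verdict").getD "") ||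
                       PySem.Str.isIn "warn" ((pvLookup d "verdict").getD "")) = true
        · obtain ⟨d, hd, htox⟩ := ht
          have h1 : 1 ≤ m := by
            rw [hm, le_foldl_rank_iff]
            refine Or.inr ⟨d, hd, ?_⟩
            rw [pvRank_ge_one_iff d (hnoblock d hd) (by simpa using hp d hd)]
            exact htox
          have : m = 1 := by omega
          rw [if_pos ⟨d, hd, htox⟩, this]
        · rw [if_neg ht]
          push_neg at ht
          have hnot1 : ¬ 1 ≤ m := by
            rw [hm, le_foldl_rank_iff]
            rintro (h | ⟨d, hd, h⟩)
            · omega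
            · exact absurd ((pvRank_ge_one_iff d (hnoblock d hd) (by simpa using hp d hd)).mp h)
                (by simpa using ht d hd)
          have : m = 0 := by omega
          rw [this]
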